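-- pv_equiv track=rewrite | github.com/clintshepard/Labs | Lab 1-2.py | delete_spaces
-- ===== SOURCE A (Python) =====
-- def delete_spaces(string1, string2):
--     string_new1 = ''
--     string_new2 = ''
--     for i in range(len(string1)):
--         if string1[i] != ' ':
--             string_new1 += string1[i]
--     for i in range(len(string2)):
--         if string2[i] != ' ':
--             string_new2 += string2[i]
--     return string_new1 == string_new2
-- ===== SOURCE B (Python) =====
-- def delete_spaces(string1, string2):
--     i, j = 0, 0
--     n1, n2 = len(string1), len(string2)
--     while True:
--         while i < n1 and string1[i] == ' ':
--             i += 1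
--         while j < n2 and string2[j] == ' ':
--             j += 1
--         if i < n1 and j < n2:
--             if string1[i] != string2[j]:
--                 return False
--             i += 1
--             j += 1
--         elif i < n1 or j < n2:
--             return False
--         else:
--             return True
-- ===== Notes on version B (the rewrite author's own statement) =====
-- stated objective: faster
-- what changed: Replaces building two space-filtered strings via repeated string concatenation and comparing them with a single interleaved two-pointer pass that skips spaces in place, compares characters on the fly and exits early on the first mismatch, allocating nothing.
import Mathlib
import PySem

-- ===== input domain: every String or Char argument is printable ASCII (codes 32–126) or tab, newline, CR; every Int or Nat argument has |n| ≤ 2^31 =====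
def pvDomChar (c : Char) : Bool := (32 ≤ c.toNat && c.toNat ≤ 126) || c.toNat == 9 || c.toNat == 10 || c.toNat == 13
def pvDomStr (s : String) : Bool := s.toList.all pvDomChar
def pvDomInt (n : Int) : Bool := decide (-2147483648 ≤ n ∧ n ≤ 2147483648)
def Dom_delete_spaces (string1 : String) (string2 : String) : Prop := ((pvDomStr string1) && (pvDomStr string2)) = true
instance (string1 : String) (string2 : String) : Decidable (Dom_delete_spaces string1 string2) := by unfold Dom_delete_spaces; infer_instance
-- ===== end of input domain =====

-- B replaces A's "build two space-filtered strings by concatenation, then compare" with one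
-- interleaved two-pointer pass that skips spaces in place, allocates nothing and exits early
-- on the first mismatch (objective: faster, measured).

-- ===== PORT A =====
-- A builds string_new by an indexed for-loop appending each non-space character.
def dsBuild (cs : List Char) : List Char :=
  (PySem.List.pyRange 0 cs.length 1).foldl
    (fun acc i => if PySem.List.pyGetD cs i ' ' ≠ ' ' then acc ++ [PySem.List.pyGetD cs i ' '] else acc) []

def delete_spaces (string1 : String) (string2 : String) : Bool :=
  dsBuild string1.toList == dsBuild string2.toList

-- ===== PORT B =====
-- B's outer 'while True' loop: each iteration skips spaces on both sides (the two inner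
-- while loops = dropWhile), then compares one character or terminates.
def dsGo (xs ys : List Char) : Bool :=
  match hx : xs.dropWhile (· == ' '), hy : ys.dropWhile (· == ' ') with
  | a :: as, b :: bs => a == b && dsGo as bs
  | [], [] => true
  | _, _ => false
termination_by xs.length + ys.length
decreasing_by
  have h1 := List.length_dropWhile_le (fun c => c == ' ') xs
  have h2 := List.length_dropWhile_le (fun c => c == ' ') ys
  rw [hx] at h1; rw [hy] at h2
  simp at h1 h2; omega

def delete_spaces_alt (string1 : String) (string2 : String) : Bool :=
  dsGo string1.toList string2.toList

-- ===== PRECONDITION & SPEC =====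
def Spec_delete_spaces (string1 : String) (string2 : String) (out : Bool) : Prop := out = delete_spaces_alt string1 string2
instance (string1 : String) (string2 : String) (out : Bool) : Decidable (Spec_delete_spaces string1 string2 out) := by unfold Spec_delete_spaces; infer_instance

-- ===== CLAIM (what is proved, stated in full; the proofs are below) =====
def Claim_equal_delete_spaces : Prop := ∀ (string1 : String) (string2 : String), Dom_delete_spaces string1 string2 → Spec_delete_spaces string1 string2 (delete_spaces string1 string2)

-- ===== LEMMAS AND PROOFS =====

-- A's indexed building loop produces exactly the non-space characters, in order.
theorem dsBuild_eq_filter (cs : List Char) :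
    dsBuild cs = cs.filter (fun c => decide (c ≠ ' ')) := by
  unfold dsBuild
  rw [PySem.List.foldl_pyRange_zero_pyGetD' (d := ' ')
        (f := fun acc c => if c ≠ ' ' then acc ++ [c] else acc)]
  rw [PySem.List.foldl_append_ite_eq_filter]
  simp

-- Filtering out spaces ignores a dropped space prefix.
theorem filter_dropWhile_space (cs : List Char) :
    cs.filter (fun c => decide (c ≠ ' ')) =
      (cs.dropWhile (· == ' ')).filter (fun c => decide (c ≠ ' ')) := by
  induction cs with
  | nil => rfl
  | cons a as ih =>
    by_cases h : a = ' '
    · subst h; simpa using ih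
    · simp [h]

-- The head surviving dropWhile (· == ' ') is not a space.
theorem head_dropWhile_space_ne (xs : List Char) (a : Char) (as : List Char)
    (h : xs.dropWhile (· == ' ') = a :: as) : ¬ a = ' ' := by
  induction xs with
  | nil => simp at h
  | cons x xt ih =>
    rw [List.dropWhile_cons] at h
    split at h
    · exact ih h
    · next hx => cases h; simpa using hx

-- B's two-pointer scan decides equality of the space-filtered lists.
theorem dsGo_eq (xs ys : List Char) :
    dsGo xs ys = (xs.filter (fun c => decide (c ≠ ' ')) == ys.filter (fun c => decide (c ≠ ' '))) := by
  fun_induction dsGo xs ys with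
  | case1 xs ys a as b bs hx hy ih =>
    rw [filter_dropWhile_space xs, filter_dropWhile_space ys, hx, hy]
    have ha := head_dropWhile_space_ne xs a as hx
    have hb := head_dropWhile_space_ne ys b bs hy
    rw [List.filter_cons_of_pos (by simpa using ha), List.filter_cons_of_pos (by simpa using hb)]
    rw [ih, List.cons_beq_cons]
  | case2 xs ys hx hy =>
    rw [filter_dropWhile_space xs, filter_dropWhile_space ys, hx, hy]; rfl
  | case3 xs ys hx hy =>
    rw [filter_dropWhile_space xs, filter_dropWhile_space ys]
    match h1 : xs.dropWhile (· == ' '), h2 : ys.dropWhile (· == ' ') with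
    | [], [] => exact absurd h2 (fun h2 => hy h1 h2)
    | a :: as, [] =>
      have ha := head_dropWhile_space_ne xs a as h1
      rw [List.filter_cons_of_pos (by simpa using ha)]; rfl
    | [], b :: bs =>
      have hb := head_dropWhile_space_ne ys b bs h2
      rw [List.filter_cons_of_pos (by simpa using hb)]; rfl
    | a :: as, b :: bs => exact absurd h2 (fun h2 => hx a as b bs h1 h2)

theorem delete_spaces_spec : Claim_equal_delete_spaces := by
  intro s1 s2 _
  unfold Spec_delete_spaces delete_spaces delete_spaces_alt
  rw [dsGo_eq, dsBuild_eq_filter, dsBuild_eq_filter]
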